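-- pv_equiv track=rewrite | github.com/alexandraback/datacollection | solutions_5686275109552128_0/Python/ftong/codejam_2015_QB.py | minutes
-- ===== SOURCE A (Python) =====
-- import math
--
-- def minutes(pancakes):
-- 	maxPancakes = max(pancakes)
-- 	if maxPancakes <= 3:
-- 		return maxPancakes
-- 	else:
-- 		possibleStops = []
-- 		for i in range(2, maxPancakes + 1):
-- 			possibleStops.append(i + stopAt(i, pancakes))
-- 		return min(possibleStops)
--
-- def stopAt(m, pancakes):
-- 	sum = 0
-- 	for i in range(len(pancakes)):
-- 		if pancakes[i] > m:
-- 			sum += int(math.ceil(float(pancakes[i])/m)) - 1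
-- 	return sum
-- ===== SOURCE B (Python) =====
-- def minutes(pancakes):
--     M = max(pancakes)
--     if M <= 3:
--         return M
--     above = [0] * M               # above[v] = number of pancakes with value > v  (0 <= v < M)
--     for p in pancakes:
--         if p > 0:
--             above[p - 1] += 1
--     for v in range(M - 2, -1, -1):
--         above[v] += above[v + 1]
--     return min(m + sum(above[k * m] for k in range(1, (M - 1) // m + 1))
--                for m in range(2, M + 1))
-- ===== Notes on version B (the rewrite author's own statement) =====
-- stated objective: faster
-- what changed: Instead of rescanning all pancakes for every candidate m (O(max*N)), B builds a suffix-count array above[v] = #pancakes > v once, so each m's extra-minute total becomes a harmonic-length sum over the multiples of m (ceil(p/m)-1 = #{k>=1 : k*m < p}), giving O(N + max log max).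
import Mathlib
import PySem

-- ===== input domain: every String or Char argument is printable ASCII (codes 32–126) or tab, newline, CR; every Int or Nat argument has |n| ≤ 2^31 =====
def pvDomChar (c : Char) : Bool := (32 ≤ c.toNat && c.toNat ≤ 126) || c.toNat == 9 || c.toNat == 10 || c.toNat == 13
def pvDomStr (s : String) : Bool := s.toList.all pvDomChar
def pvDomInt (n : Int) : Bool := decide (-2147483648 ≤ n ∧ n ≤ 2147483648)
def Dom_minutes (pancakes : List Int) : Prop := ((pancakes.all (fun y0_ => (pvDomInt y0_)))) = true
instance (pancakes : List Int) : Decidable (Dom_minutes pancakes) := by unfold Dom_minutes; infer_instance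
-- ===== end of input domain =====

-- B replaces A's per-m rescan of all pancakes by a suffix-count array summed over multiples of m (objective: faster).

-- ===== PORT A =====
-- 'int(math.ceil(float(p)/m))' is ported as the exact integer ceiling -((-p)//m): exact for the
-- admitted ints (|p| ≤ 2^31 < 2^53 and the branch gives m ≥ 2, where double division cannot
-- cross an integer boundary).
def stopAt (m : Int) (pancakes : List Int) : Int :=
  (PySem.List.pyRange 0 pancakes.length 1).foldl
    (fun s i =>
      if PySem.List.pyGetD pancakes i 0 > m then
        s + (-(PySem.Int.floordiv (-(PySem.List.pyGetD pancakes i 0)) m) - 1)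
      else s) 0

def minutes (pancakes : List Int) : Int :=
  let maxPancakes := (PySem.List.max? pancakes (fun x => x)).getD 0
  if maxPancakes ≤ 3 then maxPancakes
  else
    let possibleStops := (PySem.List.pyRange 2 (maxPancakes + 1) 1).foldl
      (fun acc i => acc ++ [i + stopAt i pancakes]) []
    (PySem.List.min? possibleStops (fun x => x)).getD 0

-- ===== PORT B =====
def minutes_alt (pancakes : List Int) : Int :=
  let M := (PySem.List.max? pancakes (fun x => x)).getD 0
  if M ≤ 3 then M
  else
    let counts := pancakes.foldl
      (fun a p => if p > 0 then PySem.List.pySetD a (p - 1) (PySem.List.pyGetD a (p - 1) 0 + 1) else a)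
      (List.replicate M.toNat 0)
    let above := (PySem.List.pyRange (M - 2) (-1) (-1)).foldl
      (fun a v => PySem.List.pySetD a v (PySem.List.pyGetD a v 0 + PySem.List.pyGetD a (v + 1) 0))
      counts
    (PySem.List.min? ((PySem.List.pyRange 2 (M + 1) 1).map
        (fun m => m + ((PySem.List.pyRange 1 (PySem.Int.floordiv (M - 1) m + 1) 1).map
            (fun k => PySem.List.pyGetD above (k * m) 0)).sum))
      (fun x => x)).getD 0

-- ===== PRECONDITION & SPEC =====
-- Pre_ excludes only the empty list, on which A's max(pancakes) raises ValueError.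
def Pre_minutes (pancakes : List Int) : Prop := pancakes ≠ []
instance (pancakes : List Int) : Decidable (Pre_minutes pancakes) := by unfold Pre_minutes; infer_instance
def pvWitness_minutes : List Int := ([4, 1, 7])

def Spec_minutes (pancakes : List Int) (out : Int) : Prop := out = minutes_alt pancakes
instance (pancakes : List Int) (out : Int) : Decidable (Spec_minutes pancakes out) := by unfold Spec_minutes; infer_instance

-- ===== CLAIM (what is proved, stated in full; the proofs are below) =====
def Claim_equal_minutes : Prop := ∀ (pancakes : List Int), Dom_minutes pancakes → Pre_minutes pancakes → Spec_minutes pancakes (minutes pancakes)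


-- ===== LEMMAS AND PROOFS =====

lemma sumComm {A B : Type} (xs : List A) (ys : List B) (f : A → B → Int) :
    (xs.map (fun x => (ys.map (fun y => f x y)).sum)).sum
      = (ys.map (fun y => (xs.map (fun x => f x y)).sum)).sum := by
  induction xs with
  | nil => simp
  | cons x xs ih =>
    simp only [List.map_cons, List.sum_cons, ih]
    rw [← PySem.List.sum_map_add_int]

lemma countSplit (v : Int) (l : List Int) :
    l.countP (fun p => decide (v < p))
      = l.countP (fun p => decide (p = v + 1)) + l.countP (fun p => decide (v + 1 < p)) := by
  induction l with
  | nil => simp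
  | cons p l ih =>
    simp only [List.countP_cons, ih]
    by_cases h1 : v < p <;> by_cases h2 : p = v + 1 <;> by_cases h3 : v + 1 < p <;> simp [h1, h2, h3] <;> omega

lemma sumIndLe (q K : Int) (hqK : q ≤ K) :
    ∀ (n : Nat) (a : Int), a = K + 1 - n →
      ((PySem.List.pyRange a (K + 1) 1).map (fun k => if k ≤ q then (1:Int) else 0)).sum
        = max 0 (q + 1 - a) := by
  intro n
  induction n with
  | zero =>
    intro a ha
    rw [PySem.List.pyRange_one_eq_nil (by omega)]
    simp; omega
  | succ n ih =>
    intro a ha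
    rw [PySem.List.pyRange_one_cons (by omega)]
    simp only [List.map_cons, List.sum_cons]
    rw [ih (a + 1) (by omega)]
    by_cases h : a ≤ q <;> simp [h] <;> omega

lemma perElem (m p M : Int) (hm : 2 ≤ m) (hmM : m ≤ M) (hpM : p ≤ M) :
    ((PySem.List.pyRange 1 (PySem.Int.floordiv (M - 1) m + 1) 1).map
        (fun k => if k * m < p then (1:Int) else 0)).sum
      = (if p > m then -(PySem.Int.floordiv (-p) m) - 1 else 0) := by
  have hm0 : (0:Int) < m := by omega
  have hK0 : 0 ≤ PySem.Int.floordiv (M - 1) m :=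
    (PySem.Int.le_floordiv_iff_mul_le hm0).mpr (by omega)
  set K := PySem.Int.floordiv (M - 1) m with hK
  by_cases hp : p > m
  · set q := -PySem.Int.floordiv (-p) m - 1 with hq
    have hbr : (q + 1 - 1) * m < p ∧ p ≤ (q + 1) * m :=
      (PySem.Int.neg_floordiv_neg_eq_iff_of_pos hm0).mp (by omega)
    have h1 : q * m < p := by nlinarith [hbr.1]
    have h2 : p ≤ q * m + m := by nlinarith [hbr.2]
    have hq1 : 1 ≤ q := by nlinarith
    have hqK : q ≤ K := by
      rw [hK]
      exact (PySem.Int.le_floordiv_iff_mul_le hm0).mpr (by omega)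
    have hcong : ∀ k ∈ PySem.List.pyRange 1 (K + 1) 1,
        (if k * m < p then (1:Int) else 0) = (if k ≤ q then (1:Int) else 0) := by
      intro k hk
      rw [PySem.List.mem_pyRange_one] at hk
      by_cases hkq : k ≤ q
      · have hkm : k * m ≤ q * m := mul_le_mul_of_nonneg_right hkq (by omega)
        rw [if_pos hkq, if_pos (by omega : k * m < p)]
      · have hkm : q * m + m ≤ k * m := by nlinarith
        rw [if_neg hkq, if_neg (by omega : ¬ (k * m < p))]
    rw [List.map_congr_left hcong]
    rw [sumIndLe q K hqK K.toNat 1 (by omega)]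
    simp [hp]; omega
  · have hcong : ∀ k ∈ PySem.List.pyRange 1 (K + 1) 1,
        (if k * m < p then (1:Int) else 0) = (if k ≤ (0:Int) then (1:Int) else 0) := by
      intro k hk
      rw [PySem.List.mem_pyRange_one] at hk
      have hkm : 1 * m ≤ k * m := mul_le_mul_of_nonneg_right (by omega) (by omega)
      rw [if_neg (by omega : ¬ (k * m < p)), if_neg (by omega : ¬ (k ≤ (0:Int)))]
    rw [List.map_congr_left hcong]
    rw [sumIndLe 0 K hK0 K.toNat 1 (by omega)]
    simp [hp]


-- Names for the two accumulator folds inside minutes_alt (definitionally equal to the literals there).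
def pvCounts (pancakes : List Int) (M : Int) : List Int :=
  pancakes.foldl
    (fun a p => if p > 0 then PySem.List.pySetD a (p - 1) (PySem.List.pyGetD a (p - 1) 0 + 1) else a)
    (List.replicate M.toNat 0)

def pvAbove (pancakes : List Int) (M : Int) : List Int :=
  (PySem.List.pyRange (M - 2) (-1) (-1)).foldl
    (fun a v => PySem.List.pySetD a v (PySem.List.pyGetD a v 0 + PySem.List.pyGetD a (v + 1) 0))
    (pvCounts pancakes M)

lemma countsSpec (M : Int) : ∀ (l : List Int) (a : List Int), (∀ p ∈ l, p ≤ M) → a.length = M.toNat →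
    (l.foldl (fun a p => if p > 0 then PySem.List.pySetD a (p - 1) (PySem.List.pyGetD a (p - 1) 0 + 1) else a) a).length = M.toNat
  ∧ ∀ v : Int, 0 ≤ v → v < M →
      PySem.List.pyGetD (l.foldl (fun a p => if p > 0 then PySem.List.pySetD a (p - 1) (PySem.List.pyGetD a (p - 1) 0 + 1) else a) a) v 0
        = PySem.List.pyGetD a v 0 + (l.countP (fun p => decide (p = v + 1)) : Int) := by
  intro l
  induction l with
  | nil => intro a _ ha; exact ⟨ha, by intro v _ _; simp⟩
  | cons p l ih =>
    intro a hle ha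
    simp only [List.foldl_cons]
    have hlen' : (if p > 0 then PySem.List.pySetD a (p - 1) (PySem.List.pyGetD a (p - 1) 0 + 1) else a).length = M.toNat := by
      by_cases hp : p > 0 <;> simp [hp, PySem.List.length_pySetD, ha]
    obtain ⟨ihlen, ihval⟩ := ih _ (fun x hx => hle x (List.mem_cons_of_mem _ hx)) hlen'
    refine ⟨ihlen, ?_⟩
    intro v hv0 hvM
    rw [ihval v hv0 hvM]
    have hstep : PySem.List.pyGetD (if p > 0 then PySem.List.pySetD a (p - 1) (PySem.List.pyGetD a (p - 1) 0 + 1) else a) v 0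
        = PySem.List.pyGetD a v 0 + (if p = v + 1 then (1:Int) else 0) := by
      by_cases hp : p > 0
      · have hpM : p ≤ M := hle p List.mem_cons_self
        have hn : ((p - 1).toNat : Int) = p - 1 := by omega
        have hv : ((v.toNat : Int)) = v := by omega
        rw [if_pos hp, ← hn, ← hv,
          PySem.List.pyGetD_pySetD_natCast a (p - 1).toNat v.toNat _ 0 (by omega)]
        by_cases he : p = v + 1
        · rw [if_pos (by omega : v.toNat = (p - 1).toNat),
            if_pos (by omega : p = ((v.toNat : Int)) + 1),
            show ((p - 1).toNat : Int) = ((v.toNat : Int)) from (by omega)]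
        · rw [if_neg (by omega : ¬ v.toNat = (p - 1).toNat),
            if_neg (by omega : ¬ p = ((v.toNat : Int)) + 1)]
          ring
      · rw [if_neg hp, if_neg (by omega : ¬ p = v + 1)]
        ring
    rw [hstep, List.countP_cons]
    by_cases he : p = v + 1 <;> simp [he] <;> omega
lemma suffixSpec : ∀ (n : Nat) (t : Int), t + 1 = n → ∀ (a : List Int), t ≤ (a.length : Int) - 2 →
    ((PySem.List.pyRange t (-1) (-1)).foldl (fun a v => PySem.List.pySetD a v (PySem.List.pyGetD a v 0 + PySem.List.pyGetD a (v + 1) 0)) a).length = a.length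
  ∧ ∀ v : Int, 0 ≤ v → v < (a.length : Int) →
      PySem.List.pyGetD ((PySem.List.pyRange t (-1) (-1)).foldl (fun a v => PySem.List.pySetD a v (PySem.List.pyGetD a v 0 + PySem.List.pyGetD a (v + 1) 0)) a) v 0
        = if v ≤ t then ((PySem.List.pyRange v (t + 2) 1).map (fun w => PySem.List.pyGetD a w 0)).sum
          else PySem.List.pyGetD a v 0 := by
  intro n
  induction n with
  | zero =>
    intro t ht a hlen
    rw [PySem.List.pyRange_neg_one_eq_nil (by omega : t ≤ -1)]
    refine ⟨rfl, ?_⟩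
    intro v hv0 hvM
    rw [if_neg (by omega : ¬ v ≤ t)]
    rfl
  | succ n ih =>
    intro t ht a hlen
    have ht0 : (0:Int) ≤ t := by omega
    rw [PySem.List.pyRange_neg_one_cons (by omega : -1 < t), List.foldl_cons]
    set a' := PySem.List.pySetD a t (PySem.List.pyGetD a t 0 + PySem.List.pyGetD a (t + 1) 0) with ha'
    have hlen' : a'.length = a.length := PySem.List.length_pySetD a t _
    have hstep : ∀ w : Int, 0 ≤ w →
        PySem.List.pyGetD a' w 0
          = if w = t then PySem.List.pyGetD a t 0 + PySem.List.pyGetD a (t + 1) 0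
            else PySem.List.pyGetD a w 0 := by
      intro w hw0
      rw [ha', show t = ((t.toNat : Int)) from (by omega), show w = ((w.toNat : Int)) from (by omega),
        PySem.List.pyGetD_pySetD_natCast a t.toNat w.toNat _ 0 (by omega)]
      by_cases he : w = t
      · rw [if_pos (by omega : w.toNat = t.toNat), if_pos (by omega : ((w.toNat : Int)) = ((t.toNat : Int)))]
      · rw [if_neg (by omega : ¬ w.toNat = t.toNat), if_neg (by omega : ¬ ((w.toNat : Int)) = ((t.toNat : Int)))]
    obtain ⟨ihlen, ihval⟩ := ih (t - 1) (by omega) a' (by omega)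
    refine ⟨by rw [ihlen, hlen'], ?_⟩
    intro v hv0 hvM
    rw [ihval v hv0 (by omega)]
    by_cases hv1 : v ≤ t - 1
    · rw [if_pos hv1, if_pos (by omega : v ≤ t)]
      have e1 : PySem.List.pyRange v (t - 1 + 2) 1 = PySem.List.pyRange v t 1 ++ [t] := by
        rw [show t - 1 + 2 = t + 1 from (by ring)]
        exact PySem.List.pyRange_one_succ_right (by omega)
      have e2 : PySem.List.pyRange v (t + 2) 1 = (PySem.List.pyRange v t 1 ++ [t]) ++ [t + 1] := by
        rw [show t + 2 = (t + 1) + 1 from (by ring),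
          PySem.List.pyRange_one_succ_right (by omega : v ≤ t + 1),
          PySem.List.pyRange_one_succ_right (by omega : v ≤ t)]
      rw [e1, e2]
      have hmap : (PySem.List.pyRange v t 1).map (fun w => PySem.List.pyGetD a' w 0)
          = (PySem.List.pyRange v t 1).map (fun w => PySem.List.pyGetD a w 0) := by
        apply List.map_congr_left
        intro w hw
        rw [PySem.List.mem_pyRange_one] at hw
        rw [hstep w (by omega), if_neg (by omega : ¬ w = t)]
      simp only [List.map_append, List.sum_append, hmap, List.map_cons, List.map_nil,
        List.sum_cons, List.sum_nil]
      rw [hstep t ht0, if_pos rfl]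
      ring
    · rw [if_neg hv1, hstep v hv0]
      by_cases hv2 : v = t
      · rw [if_pos hv2, if_pos (by omega : v ≤ t), hv2,
          show t + 2 = (t + 1) + 1 from (by ring),
          PySem.List.pyRange_one_succ_right (by omega : t ≤ t + 1),
          PySem.List.pyRange_one_singleton]
        simp
      · rw [if_neg hv2, if_neg (by omega : ¬ v ≤ t)]

lemma sumCnt (M : Int) (l : List Int) (hmax : ∀ p ∈ l, p ≤ M) :
    ∀ (n : Nat) (v : Int), 0 ≤ v → (M - v).toNat = n →
      ((PySem.List.pyRange v M 1).map (fun w => (l.countP (fun p => decide (p = w + 1)) : Int))).sum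
        = (l.countP (fun p => decide (v < p)) : Int) := by
  intro n
  induction n with
  | zero =>
    intro v hv0 hn
    rw [PySem.List.pyRange_one_eq_nil (by omega : M ≤ v)]
    rw [List.countP_eq_zero.mpr (by intro p hp; simpa using (by have := hmax p hp; omega : ¬ v < p))]
    simp
  | succ n ih =>
    intro v hv0 hn
    rw [PySem.List.pyRange_one_cons (by omega : v < M), List.map_cons, List.sum_cons,
      ih (v + 1) (by omega) (by omega), countSplit v l]
    push_cast
    ring

lemma aboveSpec (pancakes : List Int) (M : Int) (hM : 3 < M) (hmax : ∀ p ∈ pancakes, p ≤ M) :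
    ∀ v : Int, 0 ≤ v → v < M →
      PySem.List.pyGetD (pvAbove pancakes M) v 0 = (pancakes.countP (fun p => decide (v < p)) : Int) := by
  obtain ⟨clen, cval⟩ := countsSpec M pancakes (List.replicate M.toNat 0) (fun p hp => hmax p hp) (by simp)
  have cval' : ∀ w : Int, 0 ≤ w → w < M →
      PySem.List.pyGetD (pvCounts pancakes M) w 0 = (pancakes.countP (fun p => decide (p = w + 1)) : Int) := by
    intro w h0 h1
    unfold pvCounts
    rw [cval w h0 h1, PySem.List.pyGetD_eq_getElem _ _ h0 (by simp; omega)]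
    simp
  have clen' : (pvCounts pancakes M).length = M.toNat := clen
  obtain ⟨slen, sval⟩ := suffixSpec (M - 1).toNat (M - 2) (by omega) (pvCounts pancakes M) (by rw [clen']; omega)
  intro v hv0 hvM
  have hgoal : PySem.List.pyGetD (pvAbove pancakes M) v 0
      = if v ≤ M - 2 then ((PySem.List.pyRange v (M - 2 + 2) 1).map (fun w => PySem.List.pyGetD (pvCounts pancakes M) w 0)).sum
        else PySem.List.pyGetD (pvCounts pancakes M) v 0 := sval v hv0 (by rw [clen']; omega)
  rw [hgoal]
  by_cases hv : v ≤ M - 2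
  · rw [if_pos hv, show (M - 2 + 2) = M from (by ring)]
    have hmap : (PySem.List.pyRange v M 1).map (fun w => PySem.List.pyGetD (pvCounts pancakes M) w 0)
        = (PySem.List.pyRange v M 1).map (fun w => (pancakes.countP (fun p => decide (p = w + 1)) : Int)) :=
      List.map_congr_left (fun w hw => by
        rw [PySem.List.mem_pyRange_one] at hw
        exact cval' w (by omega) (by omega))
    rw [hmap]
    exact sumCnt M pancakes hmax (M - v).toNat v hv0 rfl
  · rw [if_neg hv, cval' v hv0 hvM]
    have hz : pancakes.countP (fun p => decide (v + 1 < p)) = 0 :=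
      List.countP_eq_zero.mpr (by intro p hp; simpa using (by have := hmax p hp; omega : ¬ v + 1 < p))
    have := countSplit v pancakes
    omega

lemma stopAtSpec (m : Int) (pancakes : List Int) :
    stopAt m pancakes
      = (pancakes.map (fun p => if p > m then -(PySem.Int.floordiv (-p) m) - 1 else 0)).sum := by
  unfold stopAt
  rw [show ((pancakes.length : Int)) = (PySem.List.len pancakes) from (PySem.List.len_eq pancakes).symm]
  rw [PySem.List.foldl_pyRange_zero_pyGetD pancakes 0
    (fun s x => if x > m then s + (-(PySem.Int.floordiv (-x) m) - 1) else s) 0]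
  rw [PySem.List.foldl_congr_mem pancakes _
    (fun s x => s + (if x > m then -(PySem.Int.floordiv (-x) m) - 1 else 0)) 0
    (by intro acc x hx; by_cases h : x > m <;> simp [h])]
  rw [PySem.List.foldl_add]
  simp

lemma costEq (pancakes : List Int) (M m : Int) (hmax : ∀ p ∈ pancakes, p ≤ M) (hM : 3 < M)
    (hm : 2 ≤ m) (hmM : m ≤ M) :
    m + stopAt m pancakes
      = m + ((PySem.List.pyRange 1 (PySem.Int.floordiv (M - 1) m + 1) 1).map
          (fun k => PySem.List.pyGetD (pvAbove pancakes M) (k * m) 0)).sum := by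
  have hm0 : (0:Int) < m := by omega
  have hKm : PySem.Int.floordiv (M - 1) m * m ≤ M - 1 :=
    (PySem.Int.le_floordiv_iff_mul_le hm0).mp le_rfl
  have hind : ∀ j : Int, (pancakes.countP (fun p => decide (j < p)) : Int)
      = (pancakes.map (fun p => if j < p then (1:Int) else 0)).sum := by
    intro j
    rw [← PySem.List.sum_map_ite_one_zero (fun p => decide (j < p)) pancakes]
    simp only [decide_eq_true_eq]
  have h1 : (PySem.List.pyRange 1 (PySem.Int.floordiv (M - 1) m + 1) 1).map
        (fun k => PySem.List.pyGetD (pvAbove pancakes M) (k * m) 0)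
      = (PySem.List.pyRange 1 (PySem.Int.floordiv (M - 1) m + 1) 1).map
        (fun k => (pancakes.map (fun p => if k * m < p then (1:Int) else 0)).sum) :=
    List.map_congr_left (fun k hk => by
      rw [PySem.List.mem_pyRange_one] at hk
      have hkm1 : m ≤ k * m := by nlinarith [hk.1]
      have hkm2 : k * m ≤ PySem.Int.floordiv (M - 1) m * m := by
        apply mul_le_mul_of_nonneg_right (by omega) (by omega)
      rw [aboveSpec pancakes M hM hmax (k * m) (by omega) (by omega), hind (k * m)])
  have h2 := sumComm pancakes (PySem.List.pyRange 1 (PySem.Int.floordiv (M - 1) m + 1) 1)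
    (fun p k => if k * m < p then (1:Int) else 0)
  have h3 : pancakes.map (fun p =>
        ((PySem.List.pyRange 1 (PySem.Int.floordiv (M - 1) m + 1) 1).map
          (fun k => if k * m < p then (1:Int) else 0)).sum)
      = pancakes.map (fun p => if p > m then -(PySem.Int.floordiv (-p) m) - 1 else 0) :=
    List.map_congr_left (fun p hp => perElem m p M hm hmM (hmax p hp))
  rw [stopAtSpec, h1, ← h2, h3]

-- ===== VERDICT (by name: the statement is the Claim_ definition above) =====
theorem minutes_spec : Claim_equal_minutes := by
  intro pancakes _ hpre
  unfold Spec_minutes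
  simp only [minutes, minutes_alt]
  cases hmx : PySem.List.max? pancakes (fun x => x) with
  | none => exact absurd ((PySem.List.max?_eq_none_iff pancakes (fun x => x)).mp hmx) hpre
  | some M =>
    simp only [Option.getD_some]
    by_cases hM : M ≤ 3
    · rw [if_pos hM, if_pos hM]
    · rw [if_neg hM, if_neg hM]
      have hmax : ∀ p ∈ pancakes, p ≤ M := fun p hp => PySem.List.max?_isMax hmx p hp
      have hM4 : 3 < M := by omega
      rw [PySem.List.foldl_append_singleton_eq_map, List.nil_append]
      have hmapeq : (PySem.List.pyRange 2 (M + 1) 1).map (fun i => i + stopAt i pancakes)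
          = (PySem.List.pyRange 2 (M + 1) 1).map
              (fun m => m + ((PySem.List.pyRange 1 (PySem.Int.floordiv (M - 1) m + 1) 1).map
                (fun k => PySem.List.pyGetD (pvAbove pancakes M) (k * m) 0)).sum) :=
        List.map_congr_left (fun mm hmm => by
          rw [PySem.List.mem_pyRange_one] at hmm
          exact costEq pancakes M mm hmax hM4 (by omega) (by omega))
      rw [hmapeq]
      rfl
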